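-- pv_equiv track=rewrite | github.com/FlareMark/ignaria-corpus | scripts/consolidate-lxx.py | strip_markup
-- ===== SOURCE A (Python) =====
-- def strip_markup(text):
--     """Remove morphological markup from Greek text, keeping only the words."""
--     # Pattern: word<S>number</S><m>code</m><S>number</S><S>number</S>
--     # We want to keep only the word part before the first <S>
--     words = []
--     parts = text.split()
--     for part in parts:
--         # Extract text before first <S> tag
--         word = part.split('<S>')[0]
--         if word:
--             words.append(word)
--     return ' '.join(words)
-- ===== SOURCE B (Python) =====
-- def strip_markup(text):
--     """Remove morphological markup from Greek text, keeping only the words."""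
--     # One streaming pass: accumulate the current word; as soon as it ends with
--     # '<S>' drop that tag and skip the rest of the token; whitespace flushes.
--     words = []
--     cur = ""
--     skip = False
--     for c in text:
--         if c.isspace():
--             if cur:
--                 words.append(cur)
--             cur = ""
--             skip = False
--         elif not skip:
--             cur += c
--             if cur.endswith("<S>"):
--                 cur = cur[:-3]
--                 skip = True
--     if cur:
--         words.append(cur)
--     return " ".join(words)
-- ===== Notes on version B (the rewrite author's own statement) =====
-- stated objective: alternative
-- what changed: Replaces split()-into-tokens plus a per-token split('<S>')[0] with a single streaming pass over the characters that accumulates the current word, drops the tag and skips the token tail the moment the accumulator ends with '<S>', and flushes on whitespace.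
import Mathlib
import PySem

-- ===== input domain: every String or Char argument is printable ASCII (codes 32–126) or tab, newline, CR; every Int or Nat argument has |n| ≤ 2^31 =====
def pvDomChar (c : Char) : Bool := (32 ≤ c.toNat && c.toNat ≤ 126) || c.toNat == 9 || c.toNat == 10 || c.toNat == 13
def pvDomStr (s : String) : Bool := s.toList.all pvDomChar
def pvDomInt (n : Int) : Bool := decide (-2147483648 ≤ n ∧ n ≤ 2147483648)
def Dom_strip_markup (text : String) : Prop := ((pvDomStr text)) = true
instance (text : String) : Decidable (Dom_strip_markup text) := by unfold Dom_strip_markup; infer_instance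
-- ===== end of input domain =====

-- B replaces A's split()-into-tokens + per-token split('<S>')[0] with one streaming pass
-- over the characters (accumulate the word, drop the tag and skip the token tail once the
-- accumulator ends with '<S>', flush on whitespace); objective: alternative, same cost.

-- ===== PORT A =====
-- part.split('<S>') never returns an empty list and '<S>' ≠ '', so the [0] indexing and
-- split? are total here; pyGetD's default is never used.
def strip_markup (text : String) : String :=
  let parts := PySem.Str.split₀ text
  let words := parts.foldl (fun words part =>
    let word := PySem.List.pyGetD ((PySem.Str.split? part "<S>").getD []) 0 ""
    if word ≠ "" then words ++ [word] else words) []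
  PySem.Str.join " " words

-- ===== PORT B =====
-- state: (words so far, current word, skipping-the-token-tail flag); cur as List Char in order
def pvStepB (st : List (List Char) × List Char × Bool) (c : Char) :
    List (List Char) × List Char × Bool :=
  let (words, cur, skip) := st
  if PySem.Str.isspace c then
    ((if cur ≠ [] then words ++ [cur] else words), [], false)
  else if skip then st
  else
    let cur' := cur ++ [c]
    if PySem.Chars.endswith cur' ['<', 'S', '>'] then
      (words, PySem.Chars.slice cur' none (some (-3)), true)
    else (words, cur', false)

def pvFinishB (st : List (List Char) × List Char × Bool) : List (List Char) :=
  if st.2.1 ≠ [] then st.1 ++ [st.2.1] else st.1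

def strip_markup_alt (text : String) : String :=
  let st := text.toList.foldl pvStepB ([], [], false)
  String.ofList (PySem.Chars.join [' '] (pvFinishB st))

-- ===== PRECONDITION & SPEC =====
def Spec_strip_markup (text : String) (out : String) : Prop := out = strip_markup_alt text
instance (text : String) (out : String) : Decidable (Spec_strip_markup text out) := by unfold Spec_strip_markup; infer_instance

-- ===== CLAIM (what is proved, stated in full; the proofs are below) =====
def Claim_equal_strip_markup : Prop := ∀ (text : String), Dom_strip_markup text → Spec_strip_markup text (strip_markup text)

-- ===== LEMMAS AND PROOFS =====

-- the markup opener
def pvSep : List Char := ['<', 'S', '>']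

-- prefix of a token before the first occurrence of pvSep
def pvBefore : List Char → List Char
  | [] => []
  | c :: r => if pvSep.isPrefixOf (c :: r) then [] else c :: pvBefore r

-- whitespace-split of a char list, structurally
def pvWords : List Char → List (List Char)
  | [] => []
  | c :: cs =>
    if PySem.Chars.isspace c then pvWords cs
    else (c :: cs.takeWhile (fun d => !PySem.Chars.isspace d)) ::
      pvWords (cs.dropWhile (fun d => !PySem.Chars.isspace d))
termination_by l => l.length
decreasing_by
  · simp only [List.length_cons]; omega
  · have := List.length_dropWhile_le (fun d => !PySem.Chars.isspace d) cs
    simp only [List.length_cons]; omega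

def pvWordsAux (cs cur : List Char) : List (List Char) :=
  if cur = [] then pvWords cs
  else (cur.reverse ++ cs.takeWhile (fun d => !PySem.Chars.isspace d)) ::
    pvWords (cs.dropWhile (fun d => !PySem.Chars.isspace d))

lemma pv_split₀_go (cs : List Char) : ∀ cur acc,
    PySem.Chars.split₀.go cs cur acc = acc.reverse ++ pvWordsAux cs cur := by
  induction cs with
  | nil =>
    intro cur acc
    by_cases h : cur = [] <;>
      simp [PySem.Chars.split₀.go, pvWordsAux, pvWords, h, List.isEmpty_iff]
  | cons c cs ih =>
    intro cur acc
    by_cases hs : PySem.Chars.isspace c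
    · by_cases h : cur = []
      · simp [PySem.Chars.split₀.go, hs, h, ih, pvWordsAux, pvWords]
      · simp [PySem.Chars.split₀.go, hs, h, ih, pvWordsAux, pvWords, List.isEmpty_iff]
    · by_cases h : cur = []
      · simp [PySem.Chars.split₀.go, hs, h, ih, pvWordsAux, pvWords]
      · simp [PySem.Chars.split₀.go, hs, h, ih, pvWordsAux]

lemma pv_split₀_eq (cs : List Char) : PySem.Chars.split₀ cs = pvWords cs := by
  simp [PySem.Chars.split₀, pv_split₀_go, pvWordsAux]

-- head of splitOn is the prefix before the first separator occurrence
lemma pv_splitOn_go_head : ∀ (fuel : Nat) (l cur : List Char) (acc : List (List Char)),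
    l.length < fuel → ∃ t, PySem.Chars.splitOn.go pvSep fuel l cur acc
      = acc.reverse ++ (cur.reverse ++ pvBefore l) :: t := by
  intro fuel
  induction fuel with
  | zero => intro l cur acc h; omega
  | succ k ih =>
    intro l cur acc h
    match l with
    | [] =>
      exact ⟨[], by simp [PySem.Chars.splitOn.go, pvBefore]⟩
    | c :: rest =>
      by_cases hp : pvSep.isPrefixOf (c :: rest)
      · have hlen : (List.drop pvSep.length (c :: rest)).length < k := by
          simp [pvSep] at h ⊢; omega
        obtain ⟨t, ht⟩ := ih (List.drop pvSep.length (c :: rest)) [] (cur.reverse :: acc) hlen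
        refine ⟨(pvBefore (List.drop pvSep.length (c :: rest))) :: t, ?_⟩
        simp [PySem.Chars.splitOn.go, hp, ht, pvBefore]
      · have hlen : rest.length < k := by simp at h; omega
        obtain ⟨t, ht⟩ := ih rest (c :: cur) acc hlen
        refine ⟨t, ?_⟩
        simp only [PySem.Chars.splitOn.go, hp, ht, pvBefore]
        simp

lemma pv_splitOn_head (l : List Char) :
    ∃ t, PySem.Chars.splitOn l pvSep = pvBefore l :: t := by
  obtain ⟨t, ht⟩ := pv_splitOn_go_head (l.length + 1) l [] [] (by omega)
  exact ⟨t, by simpa [PySem.Chars.splitOn] using ht⟩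

lemma pvBefore_pos {c : Char} {rest : List Char} (hp : pvSep.isPrefixOf (c :: rest) = true) :
    pvBefore (c :: rest) = [] := by
  simp only [pvBefore]; rw [if_pos hp]

lemma pvBefore_neg {c : Char} {rest : List Char} (hp : ¬ pvSep.isPrefixOf (c :: rest) = true) :
    pvBefore (c :: rest) = c :: pvBefore rest := by
  simp only [pvBefore]; rw [if_neg hp]

-- pvBefore splits a list at the first occurrence of pvSep
lemma pvBefore_spec (l : List Char) :
    ∃ r, l = pvBefore l ++ r ∧ ¬ pvSep <:+: pvBefore l ∧ (r = [] ∨ pvSep <+: r) := by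
  induction l with
  | nil => exact ⟨[], by simp [pvBefore, pvSep]⟩
  | cons c rest ih =>
    by_cases hp : pvSep.isPrefixOf (c :: rest)
    · refine ⟨c :: rest, by simp [pvBefore_pos hp], by simp [pvBefore_pos hp, pvSep], ?_⟩
      exact Or.inr (List.isPrefixOf_iff_prefix.mp hp)
    · obtain ⟨r, hr, hn, ho⟩ := ih
      refine ⟨r, ?_, ?_, ho⟩
      · simp [pvBefore_neg hp]; exact hr
      · rw [pvBefore_neg hp]
        intro hinf
        rcases List.infix_cons_iff.mp hinf with hpre | hinf2
        · have : pvSep <+: c :: rest := by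
            have h2 : c :: pvBefore rest <+: c :: rest := by
              rw [show (c :: rest) = (c :: pvBefore rest) ++ r by simp [← hr]]
              exact List.prefix_append _ _
            exact hpre.trans h2
          exact hp (List.isPrefixOf_iff_prefix.mpr this)
        · exact hn hinf2

-- uniqueness of the first-occurrence split ('<S>' does not overlap itself)
lemma pvFirst_uniq_le {l u v r s : List Char} (hlen : u.length ≤ v.length)
    (hu : l = u ++ r) (hru : r = [] ∨ pvSep <+: r)
    (hv : l = v ++ s) (hnv : ¬ pvSep <:+: v) (hrv : s = [] ∨ pvSep <+: s) : u = v := by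
  have hpu : u <+: l := hu ▸ List.prefix_append u r
  have hpv : v <+: l := hv ▸ List.prefix_append v s
  have huv : u <+: v := by
    rcases List.prefix_or_prefix_of_prefix hpu hpv with h | h
    · exact h
    · exact (h.eq_of_length_le hlen) ▸ List.prefix_rfl
  obtain ⟨w, hw⟩ := huv
  rcases w with _ | ⟨a, w⟩
  · simp at hw; simp [hw]
  exfalso
  have hr : r = (a :: w) ++ s := by
    have : u ++ r = u ++ ((a :: w) ++ s) := by
      rw [← List.append_assoc, hw, ← hv, ← hu]
    exact (List.append_cancel_left this)
  have hsep : pvSep <+: r := by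
    rcases hru with h | h
    · simp [h] at hr
    · exact h
  obtain ⟨r', hr'⟩ := hsep
  rw [← hr'] at hr
  rcases w with _ | ⟨b, w⟩
  · -- v = u ++ [a]; then s starts with 'S', never '<'
    simp [pvSep] at hr
    obtain ⟨ha, hs⟩ := hr
    rcases hrv with h | h
    · simp [h] at hs
    · rw [← hs] at h
      obtain ⟨_, hh⟩ := h
      simp [pvSep] at hh
  · rcases w with _ | ⟨c, w⟩
    · -- v = u ++ [a, b]; then s starts with '>', never '<'
      simp [pvSep] at hr
      obtain ⟨ha, hb, hs⟩ := hr
      rcases hrv with h | h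
      · simp [h] at hs
      · rw [← hs] at h
        obtain ⟨_, hh⟩ := h
        simp [pvSep] at hh
    · -- v would contain '<S>' as an infix
      simp only [pvSep, List.cons_append, List.nil_append, List.cons.injEq] at hr
      obtain ⟨ha, hb, hc, -⟩ := hr
      apply hnv
      have : pvSep <+: a :: b :: c :: w := by
        simp [pvSep]
        exact ⟨ha, hb, hc⟩
      have hinfix : (a :: b :: c :: w) <:+: v := ⟨u, [], by simp [hw]⟩
      exact this.isInfix.trans hinfix

lemma pvFirst_uniq {l u v r s : List Char}
    (hu : l = u ++ r) (hnu : ¬ pvSep <:+: u) (hru : r = [] ∨ pvSep <+: r)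
    (hv : l = v ++ s) (hnv : ¬ pvSep <:+: v) (hrv : s = [] ∨ pvSep <+: s) : u = v := by
  rcases le_total u.length v.length with h | h
  · exact pvFirst_uniq_le h hu hru hv hnv hrv
  · exact (pvFirst_uniq_le h hv hrv hu hnu hru).symm

-- B's in-word step (what pvStepB does on a non-space char)
def pvIn (st : List Char × Bool) (c : Char) : List Char × Bool :=
  if st.2 then st
  else
    let cur' := st.1 ++ [c]
    if PySem.Chars.endswith cur' ['<', 'S', '>'] then
      (PySem.Chars.slice cur' none (some (-3)), true)
    else (cur', false)

lemma pvIn_skip (t : List Char) (cur : List Char) :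
    t.foldl pvIn (cur, true) = (cur, true) := by
  induction t <;> simp_all [pvIn]

lemma pv_infix_snoc {u : List Char} {c : Char} (h : pvSep <:+: u ++ [c]) :
    pvSep <:+ u ++ [c] ∨ pvSep <:+: u := by
  have hrev : pvSep.reverse <:+: (u ++ [c]).reverse := List.reverse_infix.mpr h
  rw [List.reverse_append] at hrev
  simp only [List.reverse_cons, List.reverse_nil, List.nil_append] at hrev
  rcases List.infix_cons_iff.mp hrev with hpre | hinf
  · left
    have h2 : pvSep.reverse <+: (u ++ [c]).reverse := by
      rw [List.reverse_append]; simpa using hpre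
    exact List.reverse_prefix.mp h2
  · right
    exact List.reverse_infix.mp (by simpa using hinf)

-- if cur' ends with '<S>', the [:-3] slice removes exactly that suffix
lemma pv_slice_detect {w : List Char} :
    PySem.Chars.slice (w ++ pvSep) none (some (-3)) = w := by
  rw [PySem.Chars.slice_eq_listSlice, PySem.List.slice_to_neg_ofNat _ 3 (by omega)]
  simp [pvSep]

lemma pvStepB_nonspace (t : List Char) (h : ∀ c ∈ t, PySem.Chars.isspace c = false) :
    ∀ ws cur sk, t.foldl pvStepB (ws, cur, sk) = (ws, t.foldl pvIn (cur, sk)) := by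
  induction t with
  | nil => intro ws cur sk; rfl
  | cons c t ih =>
    intro ws cur sk
    have hc : PySem.Chars.isspace c = false := h c (by simp)
    have hstep : pvStepB (ws, cur, sk) c = (ws, pvIn (cur, sk) c) := by
      simp [pvStepB, pvIn, PySem.Str.isspace, hc]
      by_cases hsk : sk
      · simp [hsk]
      · simp [hsk]; split <;> rfl
    simp only [List.foldl_cons, hstep]
    exact ih (fun d hd => h d (by simp [hd])) ws _ _

-- B's in-word machine also splits at the first occurrence of pvSep
lemma pvIn_spec (t : List Char) : ∀ cur, ¬ pvSep <:+: cur →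
    ∃ r, cur ++ t = (t.foldl pvIn (cur, false)).1 ++ r ∧
      ¬ pvSep <:+: (t.foldl pvIn (cur, false)).1 ∧ (r = [] ∨ pvSep <+: r) := by
  induction t with
  | nil => intro cur h; exact ⟨[], by simp, h, Or.inl rfl⟩
  | cons c t ih =>
    intro cur h
    by_cases he : PySem.Chars.endswith (cur ++ [c]) ['<', 'S', '>']
    · have hsuf : pvSep <:+ cur ++ [c] :=
        List.isSuffixOf_iff_suffix.mp (by simpa [PySem.Chars.endswith, pvSep] using he)
      obtain ⟨w, hw⟩ := hsuf
      have hfold : (c :: t).foldl pvIn (cur, false) = (w, true) := by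
        simp only [List.foldl_cons, pvIn, he, if_true]
        rw [show cur ++ [c] = w ++ pvSep from hw.symm, pv_slice_detect]
        exact pvIn_skip t w
      refine ⟨pvSep ++ t, ?_, ?_, Or.inr (List.prefix_append _ _)⟩
      · rw [hfold]
        have : cur ++ [c] ++ t = w ++ pvSep ++ t := by rw [hw]
        simpa using this
      · rw [hfold]
        intro hinf
        apply h
        have hlw : w.length ≤ cur.length := by
          have := congrArg List.length hw
          simp [pvSep] at this
          omega
        have hwpre : w <+: cur := by
          have h1 : w <+: cur ++ [c] := hw ▸ List.prefix_append w pvSep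
          obtain ⟨z, hz⟩ := h1
          refine ⟨z.dropLast, ?_⟩
          have hzne : z ≠ [] := by
            intro hznil
            rw [hznil] at hz
            have := congrArg List.length hz
            simp at this
            omega
          have : (w ++ z).dropLast = (cur ++ [c]).dropLast := by rw [hz]
          rwa [List.dropLast_append_of_ne_nil (l' := w) hzne, List.dropLast_concat] at this
        exact hinf.trans hwpre.isInfix
    · have hcur' : ¬ pvSep <:+: (cur ++ [c]) := by
        intro hinf
        rcases pv_infix_snoc hinf with hsuf | hinf2
        · exact he (by simpa [PySem.Chars.endswith, pvSep] using List.isSuffixOf_iff_suffix.mpr hsuf)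
        · exact h hinf2
      obtain ⟨r, hr, hn, ho⟩ := ih (cur ++ [c]) hcur'
      have hfold : (c :: t).foldl pvIn (cur, false) = t.foldl pvIn (cur ++ [c], false) := by
        simp [pvIn, he]
      refine ⟨r, ?_, ?_, ho⟩
      · rw [hfold]; simpa using hr
      · rw [hfold]; exact hn

-- by uniqueness, B's machine computes exactly A's per-token word
lemma pvWordEq (t : List Char) : (t.foldl pvIn ([], false)).1 = pvBefore t := by
  obtain ⟨r, hr, hn, ho⟩ := pvIn_spec t [] (by simp [pvSep])
  obtain ⟨s, hs, hm, hp⟩ := pvBefore_spec t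
  exact pvFirst_uniq (by simpa using hr) hn ho hs hm hp

lemma pv_dropWhile_head {p : Char → Bool} {l r : List Char} {d : Char}
    (h : l.dropWhile p = d :: r) : p d = false := by
  induction l with
  | nil => simp at h
  | cons x xs ih =>
    by_cases hx : p x
    · exact ih (by simpa [List.dropWhile, hx] using h)
    · simp [List.dropWhile, hx] at h
      rw [← h.1]; simpa using hx

-- main loop lemma: the streaming pass produces A's filtered word list
lemma pvMain (cs : List Char) (ws : List (List Char)) :
    pvFinishB (cs.foldl pvStepB (ws, [], false))
      = ws ++ ((pvWords cs).map pvBefore).filter (fun w => w ≠ []) := by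
  match cs with
  | [] => simp [pvFinishB, pvWords]
  | c :: cs' =>
    by_cases hs : PySem.Chars.isspace c
    · have hstep : pvStepB (ws, ([] : List Char), false) c = (ws, [], false) := by
        simp [pvStepB, PySem.Str.isspace, hs]
      rw [List.foldl_cons, hstep, pvMain cs' ws]
      simp only [pvWords, hs, if_pos]
    · have hsplit : c :: cs' =
          (c :: cs'.takeWhile (fun d => !PySem.Chars.isspace d)) ++
            cs'.dropWhile (fun d => !PySem.Chars.isspace d) := by
        simp [List.takeWhile_append_dropWhile]
      set t := c :: cs'.takeWhile (fun d => !PySem.Chars.isspace d) with ht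
      set dr := cs'.dropWhile (fun d => !PySem.Chars.isspace d) with hdr
      have hts : ∀ d ∈ t, PySem.Chars.isspace d = false := by
        intro d hd
        rcases List.mem_cons.mp hd with h | h
        · rw [h]; simpa using hs
        · simpa using List.mem_takeWhile_imp h
      have hwords : pvWords (c :: cs') = t :: pvWords dr := by
        rw [pvWords]
        simp [hs, ← ht, ← hdr]
      have hfoldt : t.foldl pvStepB (ws, [], false) = (ws, t.foldl pvIn ([], false)) :=
        pvStepB_nonspace t hts ws [] false
      have hB := pvWordEq t
      have ht1 : 1 ≤ t.length := by rw [ht]; simp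
      rw [hwords, hsplit, List.foldl_append, hfoldt]
      match hdre : dr with
      | [] =>
        rw [List.foldl_nil]
        have h0 : pvWords ([] : List Char) = [] := by rw [pvWords]
        rw [h0]
        rcases em (pvBefore t = []) with hbe | hbe <;>
          simp [pvFinishB, hB, hbe]
      | d :: r =>
        have hdw : cs'.dropWhile (fun d => !PySem.Chars.isspace d) = d :: r := by
          rw [← hdr]
        have hd : PySem.Chars.isspace d = true := by
          simpa using pv_dropWhile_head hdw
        have hflush : pvStepB (ws, t.foldl pvIn ([], false)) d
            = ((if (t.foldl pvIn ([], false)).1 ≠ [] then ws ++ [(t.foldl pvIn ([], false)).1] else ws), [], false) := by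
          simp [pvStepB, PySem.Str.isspace, hd]
        have hlen : r.length < cs'.length := by
          have h3 := congrArg List.length hsplit
          simp only [List.length_cons, List.length_append] at h3
          omega
        rw [List.foldl_cons, hflush, pvMain r _]
        have hwr : pvWords (d :: r) = pvWords r := by
          rw [pvWords]; simp [hd]
        rw [hwr]
        rcases em (pvBefore t = []) with hbe | hbe <;>
          simp [hB, hbe]
termination_by cs.length
decreasing_by
  · simp
  · simp only [List.length_cons]; omega

-- A's per-token word extractor computes pvBefore
lemma pvF_toList (part : String) :
    (PySem.List.pyGetD ((PySem.Str.split? part "<S>").getD []) 0 "").toList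
      = pvBefore part.toList := by
  obtain ⟨tl, htl⟩ := pv_splitOn_head part.toList
  have hsepl : "<S>".toList = pvSep := by decide
  have hchars : PySem.Chars.split? part.toList "<S>".toList
      = some (pvBefore part.toList :: tl) := by
    rw [hsepl, PySem.Chars.split?, if_neg (by simp [pvSep]), htl]
  have hmap := PySem.Str.split?_map part "<S>"
  rw [hchars] at hmap
  cases hq : PySem.Str.split? part "<S>" with
  | none => rw [hq] at hmap; simp at hmap
  | some L =>
    rw [hq] at hmap
    simp only [Option.map_some, Option.some.injEq] at hmap
    cases L with
    | nil => simp at hmap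
    | cons wrd L' =>
      simp only [List.map_cons, List.cons.injEq] at hmap
      simp [PySem.List.pyGetD_zero, hmap.1]

lemma pv_ne_empty_iff (w : String) : (w ≠ "") ↔ (w.toList ≠ []) := by
  constructor <;> intro h <;> intro hh <;> apply h
  · exact String.toList_inj.mp (by simpa using hh)
  · simp [hh]

-- ===== VERDICT (by name: the statement is the Claim_ definition above) =====
theorem strip_markup_spec : Claim_equal_strip_markup := by
  intro text _
  show strip_markup text = strip_markup_alt text
  apply String.toList_inj.mp
  have hfun : (fun (words : List String) (part : String) =>
      let word := PySem.List.pyGetD ((PySem.Str.split? part "<S>").getD []) 0 ""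
      if word ≠ "" then words ++ [word] else words)
      = (fun words part => if (fun q : String =>
          decide ((PySem.List.pyGetD ((PySem.Str.split? q "<S>").getD []) 0 "") ≠ "")) part = true
        then words ++ [PySem.List.pyGetD ((PySem.Str.split? part "<S>").getD []) 0 ""] else words) := by
    funext a b
    simp
  rw [strip_markup, strip_markup_alt]
  rw [hfun, PySem.List.foldl_append_if]
  rw [String.toList_ofList, PySem.Str.toList_join, pvMain]
  have hjsep : " ".toList = [' '] := by decide
  rw [hjsep]
  congr 1
  have hparts : (PySem.Str.split₀ text).map String.toList = pvWords text.toList := by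
    rw [PySem.Str.split₀_map_toList, pv_split₀_eq]
  simp only [List.nil_append]
  rw [List.map_map, List.filter_map, ← hparts, List.filter_map, List.map_map]
  have hpred : (fun q : String => decide (PySem.List.pyGetD ((PySem.Str.split? q "<S>").getD []) 0 "" ≠ ""))
      = ((fun w : List Char => decide (w ≠ [])) ∘ pvBefore ∘ String.toList) := by
    funext q
    refine decide_eq_decide.mpr ?_
    simp only [Function.comp_apply]
    rw [← pvF_toList q]
    exact pv_ne_empty_iff _
  rw [hpred]
  apply List.map_congr_left
  intro x _
  simp only [Function.comp_apply]
  exact pvF_toList x
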